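-- pv_equiv track=rewrite | github.com/Unofficial-OpenTTD-Content-Repo/iron-horse | src/utils.py | convert_flat_list_to_pairs_of_tuples
-- ===== SOURCE A (Python) =====
-- def convert_flat_list_to_pairs_of_tuples(flat_list):
--     # used to create a list suitable for iterating over and pushing values to the text stack
--     # parse a flat list [a, b, c] into a list of 2 tuples [(a, b), (c, 0)] as we need to push 2 WORD values into each DWORD text stack register
--     pairs = [
--         (
--             flat_list[i],
--             flat_list[i + 1] if i + 1 < len(flat_list) else "0",
--         )
--         for i in range(0, len(flat_list), 2)
--     ]
--     return pairs
-- ===== SOURCE B (Python) =====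
-- def convert_flat_list_to_pairs_of_tuples(flat_list):
--     # pair up even- and odd-index slices, padding the odd slice with "0" if needed
--     evens = flat_list[0::2]
--     odds = flat_list[1::2]
--     if len(odds) < len(evens):
--         odds.append("0")
--     return list(zip(evens, odds))
-- ===== Notes on version B (the rewrite author's own statement) =====
-- stated objective: idiomatic
-- what changed: Replaces the index-stepping range comprehension with conditional second-element lookup by two stride-2 slices (even and odd positions), padding the odd slice with "0" once when the length is odd, recombined with zip.
import Mathlib
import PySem

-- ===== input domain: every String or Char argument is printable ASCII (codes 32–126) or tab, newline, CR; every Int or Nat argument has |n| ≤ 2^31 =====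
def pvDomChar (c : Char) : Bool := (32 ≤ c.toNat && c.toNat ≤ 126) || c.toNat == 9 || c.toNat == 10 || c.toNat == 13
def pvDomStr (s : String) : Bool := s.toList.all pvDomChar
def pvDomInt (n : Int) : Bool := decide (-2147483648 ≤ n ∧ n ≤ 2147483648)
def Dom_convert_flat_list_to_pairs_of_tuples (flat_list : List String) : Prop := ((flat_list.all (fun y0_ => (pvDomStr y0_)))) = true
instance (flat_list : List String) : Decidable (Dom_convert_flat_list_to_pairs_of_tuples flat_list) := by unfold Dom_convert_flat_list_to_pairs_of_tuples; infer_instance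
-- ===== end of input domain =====

-- B pairs the even- and odd-index stride-2 slices with zip (padding the odd slice
-- with "0" once for odd length) instead of A's index-stepping range comprehension;
-- objective: a more idiomatic decomposition, same cost.


-- ===== PORT A =====
-- comprehension over range(0, len, 2); flat_list[i] is always in range there, so
-- pyGetD's default "" is never used.
def convert_flat_list_to_pairs_of_tuples (flat_list : List String) : List (String × String) :=
  (PySem.List.pyRange 0 (flat_list.length : Int) 2).map (fun i =>
    (PySem.List.pyGetD flat_list i "",
     if i + 1 < (flat_list.length : Int) then PySem.List.pyGetD flat_list (i + 1) "" else "0"))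

-- ===== PORT B =====
-- evens = flat_list[0::2]; odds = flat_list[1::2]; pad odds with "0" if shorter; zip.
-- slice? returns none only for step 0, so .getD [] is never the default here.
def convert_flat_list_to_pairs_of_tuples_alt (flat_list : List String) : List (String × String) :=
  let evens := (PySem.List.slice? flat_list (some 0) none 2).getD []
  let odds0 := (PySem.List.slice? flat_list (some 1) none 2).getD []
  let odds := if odds0.length < evens.length then odds0 ++ ["0"] else odds0
  evens.zip odds

-- ===== PRECONDITION & SPEC =====
def Spec_convert_flat_list_to_pairs_of_tuples (flat_list : List String) (out : List (String × String)) : Prop := out = convert_flat_list_to_pairs_of_tuples_alt flat_list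
instance (flat_list : List String) (out : List (String × String)) : Decidable (Spec_convert_flat_list_to_pairs_of_tuples flat_list out) := by unfold Spec_convert_flat_list_to_pairs_of_tuples; infer_instance

-- ===== CLAIM (what is proved, stated in full; the proofs are below) =====
def Claim_equal_convert_flat_list_to_pairs_of_tuples : Prop := ∀ (flat_list : List String), Dom_convert_flat_list_to_pairs_of_tuples flat_list → Spec_convert_flat_list_to_pairs_of_tuples flat_list (convert_flat_list_to_pairs_of_tuples flat_list)

-- ===== LEMMAS AND PROOFS =====

-- reference function: consume the list two elements at a time
def pvPairUp : List String → List (String × String)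
  | [] => []
  | [a] => [(a, "0")]
  | a :: b :: t => (a, b) :: pvPairUp t

-- elements of (a :: b :: t) at even positions, recursively
def pvEvens : List String → List String
  | [] => []
  | [a] => [a]
  | a :: _ :: t => a :: pvEvens t

theorem pvEvens_cons (x : String) (r : List String) :
    pvEvens (x :: r) = x :: pvEvens r.tail := by
  cases r <;> simp [pvEvens]

theorem pyRange_two_cons {b : Int} (h : 0 < b) :
    PySem.List.pyRange 0 b 2 = 0 :: (PySem.List.pyRange 0 (b - 2) 2).map (· + 2) := by
  rw [PySem.List.pyRange_of_pos 0 b (by norm_num),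
      PySem.List.pyRange_of_pos 0 (b - 2) (by norm_num)]
  norm_num
  rw [if_pos h]
  have hc : ((b + 2 - 1) / 2).toNat = (if 2 < b then ((b - 1) / 2).toNat else 0) + 1 := by
    split_ifs with h2 <;> omega
  rw [hc, List.range_succ_eq_map, List.map_cons, List.map_map]
  norm_num
  intro k _
  ring

theorem portA_eq_pairUp (xs : List String) :
    convert_flat_list_to_pairs_of_tuples xs = pvPairUp xs := by
  induction xs using pvPairUp.induct with
  | case1 => simp [convert_flat_list_to_pairs_of_tuples, pvPairUp, PySem.List.pyRange_of_pos]
  | case2 a =>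
    simp only [convert_flat_list_to_pairs_of_tuples, pvPairUp]
    have hl : (([a] : List String).length : Int) = 1 := by simp
    have hr : PySem.List.pyRange 0 1 2 = [0] := by decide
    rw [hl, hr]
    simp [PySem.List.pyGetD, PySem.List.pyGet?, PySem.List.pyIdx?]
  | case3 a b t ih =>
    have hlen : ((a :: b :: t).length : Int) = (t.length : Int) + 2 := by
      simp; omega
    unfold convert_flat_list_to_pairs_of_tuples
    rw [hlen, pyRange_two_cons (by omega)]
    simp only [List.map_cons, List.map_map]
    have h0 : PySem.List.pyGetD (a :: b :: t) 0 "" = a := by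
      rw [PySem.List.pyGetD_of_nonneg _ _ le_rfl]; simp
    have h1 : PySem.List.pyGetD (a :: b :: t) 1 "" = b := by
      rw [PySem.List.pyGetD_of_nonneg _ _ (by norm_num)]; simp
    rw [pvPairUp]
    refine congrArg₂ _ ?_ ?_
    · have hif : ((0:Int) + 1 < (t.length : Int) + 2) := by omega
      rw [if_pos hif, h0]
      norm_num [h1]
    · rw [← ih]
      unfold convert_flat_list_to_pairs_of_tuples
      have hadd : (t.length : Int) + 2 - 2 = (t.length : Int) := by ring
      rw [hadd]
      apply List.map_congr_left
      intro i hi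
      obtain ⟨hi0, hin, -⟩ := (PySem.List.mem_pyRange_iff_of_pos (by norm_num : (0:Int) < 2) i).1 hi
      have hg : ∀ j : Int, 0 ≤ j → PySem.List.pyGetD (a :: b :: t) (j + 2) "" = PySem.List.pyGetD t j "" := by
        intro j hj
        rw [PySem.List.pyGetD_of_nonneg _ _ (by omega), PySem.List.pyGetD_of_nonneg _ _ hj]
        have h2 : (j + 2).toNat = j.toNat + 2 := by omega
        simp [h2]
      simp only [Function.comp]
      rw [hg i hi0]
      by_cases hc : i + 1 < (t.length : Int)
      · rw [if_pos hc, if_pos (by omega : i + 2 + 1 < (t.length : Int) + 2)]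
        have e : i + 2 + 1 = (i + 1) + 2 := by ring
        rw [e, hg (i + 1) (by omega)]
      · rw [if_neg hc, if_neg (by omega : ¬(i + 2 + 1 < (t.length : Int) + 2))]

theorem slice_two_zero (xs : List String) :
    PySem.List.slice? xs (some 0) none 2 = some (pvEvens xs) := by
  induction xs using pvEvens.induct with
  | case1 => decide
  | case2 a =>
    simp only [PySem.List.slice?, PySem.List.sliceIndices]
    norm_num
    simp [pvEvens]
  | case3 a b t ih =>
    simp only [PySem.List.slice?, PySem.List.sliceIndices] at ih ⊢
    norm_num at ih ⊢
    have hmin : min (0:Int) ((t.length : Int) + 1 + 1) = 0 := by omega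
    rw [hmin, if_pos (show (0:Int) ≤ (t.length : Int) + 1 by positivity)]
    have hc : (((t.length : Int) + 1 + 1 - 0 + 2 - 1) / 2).toNat
        = (if 0 < t.length then (((t.length : Int) + 2 - 1) / 2).toNat else 0) + 1 := by
      split_ifs with h2 <;> omega
    rw [hc, List.range_succ_eq_map, List.filterMap_cons, List.filterMap_map]
    have hf0 : ((a :: b :: t)[((0:Int) + 2 * ((0:Nat):Int)).toNat]?) = some a := by norm_num
    rw [hf0]
    dsimp only
    rw [pvEvens, ← ih]
    congr 1
    apply List.filterMap_congr
    intro k _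
    simp only [Function.comp, Nat.succ_eq_add_one]
    push_cast
    have h2 : ((0:Int) + 2 * ((k:Int) + 1)).toNat = ((2:Int) * (k : Int)).toNat + 2 := by omega
    rw [h2]
    simp

theorem slice_two_one (xs : List String) :
    PySem.List.slice? xs (some 1) none 2 = some (pvEvens xs.tail) := by
  cases xs with
  | nil => decide
  | cons x r =>
    have h := slice_two_zero r
    simp only [PySem.List.slice?, PySem.List.sliceIndices] at h ⊢
    norm_num at h ⊢
    have step : ∀ k ∈ List.range (if 0 < r.length then (((r.length : Int) + 2 - 1) / 2).toNat else 0),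
        ((x :: r)[((1:Int) + 2 * (k : Int)).toNat]?) = r[((2:Int) * (k : Int)).toNat]? := by
      intro k _
      have h2 : ((1:Int) + 2 * (k : Int)).toNat = ((2:Int) * (k : Int)).toNat + 1 := by
        omega
      rw [h2]
      simp
    rw [List.filterMap_congr step, h]

theorem portB_eq_pairUp (xs : List String) :
    convert_flat_list_to_pairs_of_tuples_alt xs = pvPairUp xs := by
  induction xs using pvPairUp.induct with
  | case1 => decide
  | case2 a =>
    simp [convert_flat_list_to_pairs_of_tuples_alt, slice_two_zero, slice_two_one, pvEvens, pvPairUp]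
  | case3 a b t ih =>
    have hB := ih
    rw [convert_flat_list_to_pairs_of_tuples_alt] at hB ⊢
    simp only [slice_two_zero, slice_two_one, Option.getD_some, List.tail_cons] at hB ⊢
    rw [pvEvens_cons a (b :: t), List.tail_cons, pvEvens_cons b t]
    simp only [List.length_cons]
    have hcond : ((pvEvens t.tail).length + 1 < (pvEvens t).length + 1)
        ↔ ((pvEvens t.tail).length < (pvEvens t).length) := by omega
    by_cases hc : (pvEvens t.tail).length < (pvEvens t).length
    · rw [if_pos hc] at hB
      rw [if_pos (show (pvEvens t.tail).length + 1 < (pvEvens t).length + 1 by omega)]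
      simp only [List.cons_append, List.zip_cons_cons, pvPairUp]
      exact congrArg _ hB
    · rw [if_neg hc] at hB
      rw [if_neg (show ¬((pvEvens t.tail).length + 1 < (pvEvens t).length + 1) by omega)]
      simp only [List.zip_cons_cons, pvPairUp]
      exact congrArg _ hB

-- ===== VERDICT (by name: the statement is the Claim_ definition above) =====
theorem convert_flat_list_to_pairs_of_tuples_spec : Claim_equal_convert_flat_list_to_pairs_of_tuples := by
  intro xs _
  unfold Spec_convert_flat_list_to_pairs_of_tuples
  rw [portA_eq_pairUp, portB_eq_pairUp]
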